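-- pv_equiv track=rewrite | github.com/haesookimDev/Algorithm | 프로그래머스/0/120843. 공 던지기/공 던지기.py | solution
-- ===== SOURCE A (Python) =====
-- def solution(numbers, k):
--     answer = 0
--     ball = 1
--     while True:
--         if k==ball:
--             return numbers[0]
--         first = numbers[:2]
--         numbers.remove(first[0])
--         numbers.remove(first[1])
--         numbers.extend(first)
--         ball+=1
--     return answer
-- ===== SOURCE B (Python) =====
-- def solution(numbers, k):
--     return numbers[2 * (k - 1) % len(numbers)]
-- ===== Notes on version B (the rewrite author's own statement) =====
-- stated objective: faster
-- what changed: Replaced the k-1 simulated rotate-by-two list rewrites with the closed-form index numbers[2*(k-1) % len(numbers)].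
-- outside the precondition, e.g. on solution([1, 2, 3], 0): A does not finish within the time limit, B returns 2; on solution([5], 2): A raises IndexError, B returns 5
import Mathlib
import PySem

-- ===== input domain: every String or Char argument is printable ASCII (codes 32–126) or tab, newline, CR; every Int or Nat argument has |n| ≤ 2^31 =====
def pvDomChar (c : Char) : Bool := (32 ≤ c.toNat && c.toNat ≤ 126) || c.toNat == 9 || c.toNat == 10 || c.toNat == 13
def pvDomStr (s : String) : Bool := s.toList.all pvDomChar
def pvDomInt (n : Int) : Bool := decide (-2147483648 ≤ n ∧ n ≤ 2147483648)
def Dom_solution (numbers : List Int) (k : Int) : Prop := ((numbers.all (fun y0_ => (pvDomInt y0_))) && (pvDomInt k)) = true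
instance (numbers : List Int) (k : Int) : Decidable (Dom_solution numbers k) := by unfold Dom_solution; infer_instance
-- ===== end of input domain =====

-- B replaces A's k-1 in-place rotate-by-two rewrites of the list with the closed-form
-- index numbers[2*(k-1) % len(numbers)] (O(1) vs O(k*n)); A mutates its list argument
-- in place, B does not — the equivalence proved here is about the return value only.


-- ===== PORT A =====
-- the while-loop of A: `fuel` = number of iterations before k == ball (= (k-1).toNat);
-- each iteration takes first = numbers[:2], removes both its elements, extends by first.
-- `none` results of the PySem primitives (IndexError/ValueError, excluded by Pre_) yield 0.
def solutionLoop : List Int → Nat → Int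
  | numbers, 0 => (PySem.List.pyGet? numbers 0).getD 0
  | numbers, fuel + 1 =>
      let first := PySem.List.slice numbers none (some 2)
      match PySem.List.pyGet? first 0 with
      | none => 0
      | some f0 =>
        match PySem.List.remove? numbers f0 with
        | none => 0
        | some n1 =>
          match PySem.List.pyGet? first 1 with
          | none => 0
          | some f1 =>
            match PySem.List.remove? n1 f1 with
            | none => 0
            | some n2 => solutionLoop (n2 ++ first) fuel

def solution (numbers : List Int) (k : Int) : Int :=
  solutionLoop numbers (k - 1).toNat

-- ===== PORT B =====
def solution_alt (numbers : List Int) (k : Int) : Int :=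
  (PySem.List.pyGet? numbers (PySem.Int.mod (2 * (k - 1)) (numbers.length : Int))).getD 0

-- ===== PRECONDITION & SPEC =====
-- A loops forever when k < 1 and raises IndexError when k > 1 and the list has fewer
-- than 2 elements (or k = 1 with an empty list); exactly those inputs are excluded.
def Pre_solution (numbers : List Int) (k : Int) : Prop :=
  1 ≤ k ∧ numbers ≠ [] ∧ (k = 1 ∨ 2 ≤ numbers.length)
instance (numbers : List Int) (k : Int) : Decidable (Pre_solution numbers k) := by
  unfold Pre_solution; infer_instance
def pvWitness_solution : List Int × Int := ([1, 2, 3, 4], 3)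

def Spec_solution (numbers : List Int) (k : Int) (out : Int) : Prop := out = solution_alt numbers k
instance (numbers : List Int) (k : Int) (out : Int) : Decidable (Spec_solution numbers k out) := by unfold Spec_solution; infer_instance

-- ===== CLAIM (what is proved, stated in full; the proofs are below) =====
def Claim_equal_solution : Prop := ∀ (numbers : List Int) (k : Int), Dom_solution numbers k → Pre_solution numbers k → Spec_solution numbers k (solution numbers k)

-- ===== LEMMAS AND PROOFS =====

-- one loop iteration on a list of length ≥ 2 rotates it left by two
theorem solutionLoop_step (a b : Int) (t : List Int) (fuel : Nat) :
    solutionLoop (a :: b :: t) (fuel + 1) = solutionLoop (t ++ [a, b]) fuel := by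
  simp only [solutionLoop, PySem.List.slice_to _ (by norm_num : (0:Int) ≤ 2)]
  simp [PySem.List.remove?_cons_self]

theorem solutionLoop_rotate (fuel : Nat) (l : List Int) (h : 2 ≤ l.length) :
    solutionLoop l fuel = (l[(2 * fuel) % l.length]?).getD 0 := by
  induction fuel generalizing l with
  | zero => simp [solutionLoop, PySem.List.pyGet?_zero]
  | succ m ih =>
    match l, h with
    | a :: b :: t, _ =>
      rw [solutionLoop_step, ih (t ++ [a, b]) (by simp)]
      have hrot : t ++ [a, b] = (a :: b :: t).rotate 2 := by
        rw [List.rotate_eq_drop_append_take (by simp)]; simp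
      rw [hrot]
      rw [List.getElem?_rotate]
      congr 1
      simp only [List.length_rotate]
      rw [show 2 * (m + 1) = 2 * m + 2 by ring, Nat.add_mod (2 * m) 2,
        Nat.add_mod (2 * m % (a :: b :: t).length) 2]
      simp
      simp only [List.length_rotate]
      exact Nat.mod_lt _ (by simp)

-- ===== VERDICT (by name: the statement is the Claim_ definition above) =====
theorem solution_spec : Claim_equal_solution := by
  intro numbers k _ hpre
  obtain ⟨hk, hne, hor⟩ := hpre
  have hlen : 0 < numbers.length := List.length_pos_of_ne_nil hne
  unfold Spec_solution solution solution_alt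
  rw [PySem.Int.mod_eq_emod_of_pos (by exact_mod_cast hlen)]
  rw [show (2 * (k - 1) : Int) = ((2 * (k - 1)).toNat : Int) by omega]
  rw [← Int.natCast_emod, PySem.List.pyGet?_natCast]
  rcases hor with h1 | h2
  · subst h1
    simp [solutionLoop, PySem.List.pyGet?_zero]
  · rw [show (2 * (k - 1)).toNat = 2 * (k - 1).toNat by omega]
    exact solutionLoop_rotate _ _ h2
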